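-- pv_equiv track=rewrite | github.com/idle-danie/Algorithm | 프로그래머스/2/340211. ［PCCP 기출문제］ 3번 ／ 충돌위험 찾기/［PCCP 기출문제］ 3번 ／ 충돌위험 찾기.py | write_move_path
-- ===== SOURCE A (Python) =====
-- def write_move_path(start, end):
--     path = []
--
--     r_diff = abs(start[0] - end[0])
--     if start[0] > end[0]:
--         for i in range(1, r_diff + 1):
--             path.append([start[0] - i, start[1]])
--     else:
--         for i in range(1, r_diff + 1):
--             path.append([start[0] + i, start[1]])
--
--     r_temp = path[-1][0] if path else start[0]
--
--     c_diff = abs(start[1] - end[1])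
--     if start[1] > end[1]:
--         for i in range(1, c_diff + 1):
--             path.append([r_temp, start[1] - i])
--     else:
--         for i in range(1, c_diff + 1):
--             path.append([r_temp, start[1] + i])
--
--     return path
-- ===== SOURCE B (Python) =====
-- def write_move_path(start, end):
--     # Walk backwards from end to start one step at a time (undoing the column
--     # moves first, then the row moves), recording each visited point, then
--     # reverse the record to obtain the forward row-then-column path.
--     s0, s1 = start[0], start[1]
--     r, c = end[0], end[1]
--     rev = []
--     while (r, c) != (s0, s1):
--         rev.append([r, c])
--         if c != s1:
--             c += 1 if c < s1 else -1
--         else: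
--             r += 1 if r < s0 else -1
--     rev.reverse()
--     return rev
-- ===== Notes on version B (the rewrite author's own statement) =====
-- stated objective: alternative
-- what changed: Builds the path back-to-front: instead of A's four direction-cased forward loops over precomputed abs-differences (plus the path[-1] row lookup), B walks a single cursor from the end point back to the start one unit step at a time (undoing column moves first, then row moves), records the visited points, and reverses the record.
import Mathlib
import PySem

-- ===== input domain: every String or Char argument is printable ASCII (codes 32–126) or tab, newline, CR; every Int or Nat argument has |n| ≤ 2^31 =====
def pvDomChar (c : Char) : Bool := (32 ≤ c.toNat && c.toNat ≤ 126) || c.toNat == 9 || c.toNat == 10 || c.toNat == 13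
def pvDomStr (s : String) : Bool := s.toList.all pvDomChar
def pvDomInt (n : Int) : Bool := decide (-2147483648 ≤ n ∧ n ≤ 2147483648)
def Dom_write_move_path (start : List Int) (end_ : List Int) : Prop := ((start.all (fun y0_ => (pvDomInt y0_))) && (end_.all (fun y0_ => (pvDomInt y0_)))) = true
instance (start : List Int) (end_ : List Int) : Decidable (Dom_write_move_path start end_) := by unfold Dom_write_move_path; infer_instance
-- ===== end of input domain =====

-- B builds the path back-to-front: a single cursor walks from end to start one step
-- at a time, the visited points are recorded and reversed; objective: alternative.


-- ===== PORT A =====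
def write_move_path (start : List Int) (end_ : List Int) : List (List Int) :=
  let s0 := (PySem.List.pyGet? start 0).getD 0
  let s1 := (PySem.List.pyGet? start 1).getD 0
  let e0 := (PySem.List.pyGet? end_ 0).getD 0
  let e1 := (PySem.List.pyGet? end_ 1).getD 0
  let r_diff : Int := ((s0 - e0).natAbs : Int)
  let path : List (List Int) :=
    if s0 > e0 then
      (PySem.List.pyRange 1 (r_diff + 1) 1).foldl (fun acc i => acc ++ [[s0 - i, s1]]) []
    else
      (PySem.List.pyRange 1 (r_diff + 1) 1).foldl (fun acc i => acc ++ [[s0 + i, s1]]) []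
  -- r_temp = path[-1][0] if path else start[0]
  let r_temp : Int := match path.getLast? with
    | some p => (PySem.List.pyGet? p 0).getD 0
    | none => s0
  let c_diff : Int := ((s1 - e1).natAbs : Int)
  if s1 > e1 then
    (PySem.List.pyRange 1 (c_diff + 1) 1).foldl (fun acc i => acc ++ [[r_temp, s1 - i]]) path
  else
    (PySem.List.pyRange 1 (c_diff + 1) 1).foldl (fun acc i => acc ++ [[r_temp, s1 + i]]) path

-- ===== PORT B =====
-- the while loop of Source B: (r, c) walks back towards (s0, s1); the returned list is
-- the sequence of visited points (head = first visited), i.e. python's `rev`.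
-- structural recursion on an exact step budget (each loop iteration moves the
-- cursor one unit closer, so the budget is exactly the number of iterations)
def wmpBackGo : Nat → Int → Int → Int → Int → List (List Int)
  | 0, _, _, _, _ => []
  | fuel + 1, s0, s1, r, c =>
    if r = s0 ∧ c = s1 then []
    else
      [r, c] ::
        (if c ≠ s1 then wmpBackGo fuel s0 s1 r (c + (if c < s1 then 1 else -1))
         else wmpBackGo fuel s0 s1 (r + (if r < s0 then 1 else -1)) c)

def wmpBack (s0 s1 r c : Int) : List (List Int) :=
  wmpBackGo ((r - s0).natAbs + (c - s1).natAbs) s0 s1 r c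

def write_move_path_alt (start : List Int) (end_ : List Int) : List (List Int) :=
  let s0 := (PySem.List.pyGet? start 0).getD 0
  let s1 := (PySem.List.pyGet? start 1).getD 0
  let e0 := (PySem.List.pyGet? end_ 0).getD 0
  let e1 := (PySem.List.pyGet? end_ 1).getD 0
  (wmpBack s0 s1 e0 e1).reverse

-- ===== PRECONDITION & SPEC =====
-- A (and B) index start[0], start[1], end[0], end[1]; both raise IndexError on shorter lists.
def Pre_write_move_path (start : List Int) (end_ : List Int) : Prop :=
  2 ≤ start.length ∧ 2 ≤ end_.length
instance (start : List Int) (end_ : List Int) : Decidable (Pre_write_move_path start end_) := by unfold Pre_write_move_path; infer_instance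
def pvWitness_write_move_path : List Int × List Int := ([0, 0], [2, -1])

def Spec_write_move_path (start : List Int) (end_ : List Int) (out : List (List Int)) : Prop := out = write_move_path_alt start end_
instance (start : List Int) (end_ : List Int) (out : List (List Int)) : Decidable (Spec_write_move_path start end_ out) := by unfold Spec_write_move_path; infer_instance

-- ===== CLAIM (what is proved, stated in full; the proofs are below) =====
def Claim_equal_write_move_path : Prop := ∀ (start : List Int) (end_ : List Int), Dom_write_move_path start end_ → Pre_write_move_path start end_ → Spec_write_move_path start end_ (write_move_path start end_)

-- ===== LEMMAS AND PROOFS =====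

-- A's append-in-a-loop fold is the map over the same range.
theorem foldl_push {α β : Type} (f : α → β) :
    ∀ (l : List α) (init : List β),
      l.foldl (fun acc i => acc ++ [f i]) init = init ++ l.map f := by
  intro l
  induction l with
  | nil => simp
  | cons x xs ih => intro init; simp [List.foldl_cons, ih]

-- an if over two appends with the same prefix
theorem ite_append_left {γ : Type} (c : Prop) [Decidable c] (a x y : List γ) :
    (if c then a ++ x else a ++ y) = a ++ (if c then x else y) := by
  split <;> rfl

-- reversing a map over List.range flips the index
theorem rev_map_range {β : Type} (n : Nat) (f : Nat → β) :
    ((List.range n).map f).reverse = (List.range n).map (fun k => f (n - 1 - k)) := by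
  apply List.ext_getElem
  · simp
  · intro i h1 h2
    simp only [List.length_reverse, List.length_map, List.length_range] at h1
    simp only [List.getElem_reverse, List.getElem_map, List.getElem_range,
      List.length_map, List.length_range]

-- row phase of the backward walk, r above s0
theorem back_row_up (s0 s1 : Int) :
    ∀ n : Nat, wmpBackGo n s0 s1 (s0 + n) s1
      = (List.range n).map (fun k : Nat => [s0 + (n : Int) - (k : Int), s1]) := by
  intro n
  induction n with
  | zero => simp [wmpBackGo]
  | succ m ih =>
    rw [wmpBackGo]
    rw [if_neg (by push_cast; omega), if_neg (by simp), if_neg (by push_cast; omega)]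
    have h : s0 + ((m + 1 : Nat) : Int) + -1 = s0 + (m : Int) := by push_cast; ring
    rw [h, ih, List.range_succ_eq_map, List.map_cons, List.map_map]
    refine List.cons_eq_cons.mpr ⟨by push_cast; norm_num, ?_⟩
    refine List.map_congr_left ?_
    intro k hk
    simp only [Function.comp, List.cons.injEq, and_true]
    push_cast
    ring

-- row phase of the backward walk, r below s0
theorem back_row_down (s0 s1 : Int) :
    ∀ n : Nat, wmpBackGo n s0 s1 (s0 - n) s1
      = (List.range n).map (fun k : Nat => [s0 - (n : Int) + (k : Int), s1]) := by
  intro n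
  induction n with
  | zero => simp [wmpBackGo]
  | succ m ih =>
    rw [wmpBackGo]
    rw [if_neg (by push_cast; omega), if_neg (by simp), if_pos (by push_cast; omega)]
    have h : s0 - ((m + 1 : Nat) : Int) + 1 = s0 - (m : Int) := by push_cast; ring
    rw [h, ih, List.range_succ_eq_map, List.map_cons, List.map_map]
    refine List.cons_eq_cons.mpr ⟨by push_cast; norm_num, ?_⟩
    refine List.map_congr_left ?_
    intro k hk
    simp only [Function.comp, List.cons.injEq, and_true]
    push_cast
    ring

-- column phase of the backward walk, c above s1 (the row stays at e0 and the
-- walk continues with the row phase once c reaches s1)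
theorem back_col_up (s0 s1 e0 : Int) (m : Nat) :
    ∀ n : Nat, wmpBackGo (m + n) s0 s1 e0 (s1 + n)
      = (List.range n).map (fun k : Nat => [e0, s1 + (n : Int) - (k : Int)]) ++ wmpBackGo m s0 s1 e0 s1 := by
  intro n
  induction n with
  | zero => simp
  | succ m' ih =>
    rw [show m + (m' + 1) = (m + m') + 1 from by omega, wmpBackGo]
    rw [if_neg (by push_cast; omega), if_pos (by push_cast; omega), if_neg (by push_cast; omega)]
    have h : s1 + ((m' + 1 : Nat) : Int) + -1 = s1 + (m' : Int) := by push_cast; ring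
    rw [h, ih, List.range_succ_eq_map, List.map_cons, List.map_map, List.cons_append]
    refine List.cons_eq_cons.mpr ⟨by push_cast; norm_num, ?_⟩
    congr 1
    refine List.map_congr_left ?_
    intro k hk
    simp only [Function.comp, List.cons.injEq, true_and, and_true]
    push_cast
    ring

-- column phase of the backward walk, c below s1
theorem back_col_down (s0 s1 e0 : Int) (m : Nat) :
    ∀ n : Nat, wmpBackGo (m + n) s0 s1 e0 (s1 - n)
      = (List.range n).map (fun k : Nat => [e0, s1 - (n : Int) + (k : Int)]) ++ wmpBackGo m s0 s1 e0 s1 := by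
  intro n
  induction n with
  | zero => simp
  | succ m' ih =>
    rw [show m + (m' + 1) = (m + m') + 1 from by omega, wmpBackGo]
    rw [if_neg (by push_cast; omega), if_pos (by push_cast; omega), if_pos (by push_cast; omega)]
    have h : s1 - ((m' + 1 : Nat) : Int) + 1 = s1 - (m' : Int) := by push_cast; ring
    rw [h, ih, List.range_succ_eq_map, List.map_cons, List.map_map, List.cons_append]
    refine List.cons_eq_cons.mpr ⟨by push_cast; norm_num, ?_⟩
    congr 1
    refine List.map_congr_left ?_
    intro k hk
    simp only [Function.comp, List.cons.injEq, true_and, and_true]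
    push_cast
    ring

-- A's row segment is the reversed row phase of the backward walk
theorem rowA_eq (s0 s1 e0 : Int) :
    (if s0 > e0 then
        (PySem.List.pyRange 1 (((s0 - e0).natAbs : Int) + 1) 1).map (fun i => [s0 - i, s1])
      else
        (PySem.List.pyRange 1 (((s0 - e0).natAbs : Int) + 1) 1).map (fun i => [s0 + i, s1]))
    = (wmpBack s0 s1 e0 s1).reverse := by
  rw [PySem.List.pyRange_one]
  have hn : (((s0 - e0).natAbs : Int) + 1 - 1).toNat = (s0 - e0).natAbs := by omega
  rw [hn]
  generalize hg : (s0 - e0).natAbs = n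
  rcases lt_trichotomy s0 e0 with h | h | h
  · -- e0 = s0 + n
    have he : wmpBack s0 s1 e0 s1 = wmpBackGo n s0 s1 (s0 + (n : Int)) s1 := by
      rw [wmpBack, show (e0 - s0).natAbs + (s1 - s1).natAbs = n from by omega,
        show e0 = s0 + (n : Int) from by omega]
    rw [if_neg (by omega), he, back_row_up, rev_map_range]
    simp only [List.map_map]
    refine List.map_congr_left ?_
    intro k hk
    rw [List.mem_range] at hk
    simp only [Function.comp, List.cons.injEq, and_true]
    omega
  · subst h
    have hn0 : n = 0 := by omega
    subst hn0
    rw [if_neg (by omega)]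
    simp [wmpBack, wmpBackGo]
  · have he : wmpBack s0 s1 e0 s1 = wmpBackGo n s0 s1 (s0 - (n : Int)) s1 := by
      rw [wmpBack, show (e0 - s0).natAbs + (s1 - s1).natAbs = n from by omega,
        show e0 = s0 - (n : Int) from by omega]
    rw [if_pos (by omega), he, back_row_down, rev_map_range]
    simp only [List.map_map]
    refine List.map_congr_left ?_
    intro k hk
    rw [List.mem_range] at hk
    simp only [Function.comp, List.cons.injEq, and_true]
    omega

-- the whole backward walk = reversed column segment of A followed by its row phase
theorem colA_eq (s0 s1 e0 e1 : Int) :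
    wmpBack s0 s1 e0 e1
    = (if s1 > e1 then
        (PySem.List.pyRange 1 (((s1 - e1).natAbs : Int) + 1) 1).map (fun i => [e0, s1 - i])
      else
        (PySem.List.pyRange 1 (((s1 - e1).natAbs : Int) + 1) 1).map (fun i => [e0, s1 + i])).reverse
      ++ wmpBack s0 s1 e0 s1 := by
  rw [PySem.List.pyRange_one]
  have hn : (((s1 - e1).natAbs : Int) + 1 - 1).toNat = (s1 - e1).natAbs := by omega
  rw [hn]
  generalize hg : (s1 - e1).natAbs = n
  rcases lt_trichotomy s1 e1 with h | h | h
  · have he : wmpBack s0 s1 e0 e1 = wmpBackGo ((e0 - s0).natAbs + n) s0 s1 e0 (s1 + (n : Int)) := by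
      rw [wmpBack, show (e0 - s0).natAbs + (e1 - s1).natAbs = (e0 - s0).natAbs + n from by omega,
        show e1 = s1 + (n : Int) from by omega]
    have htail : wmpBackGo ((e0 - s0).natAbs) s0 s1 e0 s1 = wmpBack s0 s1 e0 s1 := by
      rw [wmpBack, show (e0 - s0).natAbs + (s1 - s1).natAbs = (e0 - s0).natAbs from by omega]
    rw [he, if_neg (by omega), back_col_up, htail, List.map_map, rev_map_range]
    congr 1
    refine List.map_congr_left ?_
    intro k hk
    rw [List.mem_range] at hk
    simp only [Function.comp, List.cons.injEq, true_and, and_true]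
    omega
  · subst h
    have hn0 : n = 0 := by omega
    subst hn0
    rw [if_neg (by omega)]
    simp
  · have he : wmpBack s0 s1 e0 e1 = wmpBackGo ((e0 - s0).natAbs + n) s0 s1 e0 (s1 - (n : Int)) := by
      rw [wmpBack, show (e0 - s0).natAbs + (e1 - s1).natAbs = (e0 - s0).natAbs + n from by omega,
        show e1 = s1 - (n : Int) from by omega]
    have htail : wmpBackGo ((e0 - s0).natAbs) s0 s1 e0 s1 = wmpBack s0 s1 e0 s1 := by
      rw [wmpBack, show (e0 - s0).natAbs + (s1 - s1).natAbs = (e0 - s0).natAbs from by omega]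
    rw [he, if_pos (by omega), back_col_down, htail, List.map_map, rev_map_range]
    congr 1
    refine List.map_congr_left ?_
    intro k hk
    rw [List.mem_range] at hk
    simp only [Function.comp, List.cons.injEq, true_and, and_true]
    omega

-- A's r_temp (row of the last built point, else start's row) is always end[0]
theorem rtemp_eq (s0 s1 e0 : Int) :
    (match (if s0 > e0 then
        (PySem.List.pyRange 1 (((s0 - e0).natAbs : Int) + 1) 1).map (fun i => [s0 - i, s1])
      else
        (PySem.List.pyRange 1 (((s0 - e0).natAbs : Int) + 1) 1).map (fun i => [s0 + i, s1])).getLast? with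
      | some p => (PySem.List.pyGet? p 0).getD 0
      | none => s0) = e0 := by
  rcases lt_trichotomy s0 e0 with h | h | h
  · have hr : (1:Int) ≤ ((s0 - e0).natAbs : Int) := by omega
    have hn : ((s0 - e0).natAbs : Int) = e0 - s0 := by omega
    rw [if_neg (by omega), PySem.List.pyRange_one_succ_right hr, List.map_append]
    simp [PySem.List.pyGet?, PySem.List.pyIdx?, hn]
  · subst h
    simp
  · have hr : (1:Int) ≤ ((s0 - e0).natAbs : Int) := by omega
    have hn : ((s0 - e0).natAbs : Int) = s0 - e0 := by omega
    rw [if_pos (by omega), PySem.List.pyRange_one_succ_right hr, List.map_append]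
    simp [PySem.List.pyGet?, PySem.List.pyIdx?, hn]

-- ===== VERDICT (by name: the statement is the Claim_ definition above) =====
theorem write_move_path_spec : Claim_equal_write_move_path := by
  intro start end_ _ _
  unfold Spec_write_move_path write_move_path write_move_path_alt
  generalize (PySem.List.pyGet? start 0).getD 0 = s0
  generalize (PySem.List.pyGet? start 1).getD 0 = s1
  generalize (PySem.List.pyGet? end_ 0).getD 0 = e0
  generalize (PySem.List.pyGet? end_ 1).getD 0 = e1
  simp only [foldl_push, List.nil_append]
  rw [ite_append_left]
  simp only [rtemp_eq]
  rw [colA_eq s0 s1 e0 e1, List.reverse_append, List.reverse_reverse, rowA_eq s0 s1 e0]
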